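-- pv_equiv track=rewrite | github.com/florenciarouco/tallerDeGit | comisionD.py | subsecuencia_mas_larga
-- ===== SOURCE A (Python) =====
-- from typing import List
--
-- def subsecuencia_mas_larga (tipos:List[str]) -> int:
--     res:int = 0
--     largo_max:int = 0
--     largo_actual:int = 0
--     indice:int = 0
--     for t in tipos:
--         if t == "perro" or t == "gato":
--             largo_actual +=1
--         else:
--             if largo_max < largo_actual:
--                 res = indice - largo_actual
--                 largo_max = largo_actual
--             largo_actual = 0
--         indice +=1
--
--     if largo_max < largo_actual:
--         res = indice - largo_actual
--
--     return res
-- ===== SOURCE B (Python) =====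
-- from typing import List
--
-- def subsecuencia_mas_larga(tipos: List[str]) -> int:
--     # Phase 1: materialize all maximal runs of "perro"/"gato" as (start, length).
--     runs = []
--     n = len(tipos)
--     i = 0
--     while i < n:
--         m = tipos[i] in ("perro", "gato")
--         j = i + 1
--         while j < n and (tipos[j] in ("perro", "gato")) == m:
--             j += 1
--         if m:
--             runs.append((i, j - i))
--         i = j
--     # Phase 2: pick the first longest run (strict >, so first wins ties).
--     best = (0, 0)
--     for run in runs:
--         if run[1] > best[1]:
--             best = run
--     return best[0]
-- ===== Notes on version B (the rewrite author's own statement) =====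
-- stated objective: alternative
-- what changed: B first materializes the list of maximal perro/gato runs as (start, length) pairs via a block-skipping two-level loop, then selects the first longest run in a separate pass, instead of A's single element-wise scan with four mutable counters.
import Mathlib
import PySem

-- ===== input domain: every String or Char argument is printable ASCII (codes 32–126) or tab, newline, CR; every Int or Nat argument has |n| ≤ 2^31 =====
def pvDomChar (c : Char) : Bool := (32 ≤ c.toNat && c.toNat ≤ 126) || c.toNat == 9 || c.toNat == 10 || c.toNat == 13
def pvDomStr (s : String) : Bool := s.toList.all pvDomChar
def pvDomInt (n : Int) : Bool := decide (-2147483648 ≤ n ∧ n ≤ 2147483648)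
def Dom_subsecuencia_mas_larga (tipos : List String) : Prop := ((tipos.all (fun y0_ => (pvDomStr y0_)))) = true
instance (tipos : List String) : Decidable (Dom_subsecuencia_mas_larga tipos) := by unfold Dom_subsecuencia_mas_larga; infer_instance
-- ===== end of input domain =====

-- B restructures A's single four-counter scan into: build the list of maximal
-- perro/gato runs (start, length), then pick the first longest in a second pass
-- (objective: alternative decomposition, same O(n) cost).

-- ===== PORT A =====
-- state (res, largo_max, largo_actual, indice), exactly A's loop body
def pvAstep (s : Int × Int × Int × Int) (t : String) : Int × Int × Int × Int :=
  let (res, lm, la, idx) := s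
  if t == "perro" || t == "gato" then (res, lm, la + 1, idx + 1)
  else if lm < la then (idx - la, la, 0, idx + 1)
  else (res, lm, 0, idx + 1)

def subsecuencia_mas_larga (tipos : List String) : Int :=
  let s := tipos.foldl pvAstep (0, 0, 0, 0)
  if s.2.1 < s.2.2.1 then s.2.2.2 - s.2.2.1 else s.1

-- ===== PORT B =====
def pvIsPet (t : String) : Bool := t == "perro" || t == "gato"

-- length of the prefix of l whose elements have pvIsPet = m (B's inner while loop)
def pvRunLen (m : Bool) : List String → Nat
  | [] => 0
  | t :: r => if pvIsPet t == m then pvRunLen m r + 1 else 0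

-- B's outer while loop: the maximal pet runs of l as (start, length), starts offset by i
def pvRuns (l : List String) (i : Int) : List (Int × Int) :=
  match l with
  | [] => []
  | t :: r =>
    let m := pvIsPet t
    let k := pvRunLen m r + 1
    let rest := pvRuns (r.drop (pvRunLen m r)) (i + (k : Int))
    if m then (i, (k : Int)) :: rest else rest
termination_by l.length
decreasing_by
  simp only [List.length_cons, List.length_drop]
  omega

def pvPick (b : Int × Int) (r : Int × Int) : Int × Int := if r.2 > b.2 then r else b

def subsecuencia_mas_larga_alt (tipos : List String) : Int :=
  ((pvRuns tipos 0).foldl pvPick (0, 0)).1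

-- ===== PRECONDITION & SPEC =====
def Spec_subsecuencia_mas_larga (tipos : List String) (out : Int) : Prop := out = subsecuencia_mas_larga_alt tipos
instance (tipos : List String) (out : Int) : Decidable (Spec_subsecuencia_mas_larga tipos out) := by unfold Spec_subsecuencia_mas_larga; infer_instance

-- ===== CLAIM (what is proved, stated in full; the proofs are below) =====
def Claim_equal_subsecuencia_mas_larga : Prop := ∀ (tipos : List String), Dom_subsecuencia_mas_larga tipos → Spec_subsecuencia_mas_larga tipos (subsecuencia_mas_larga tipos)

-- ===== LEMMAS AND PROOFS =====
-- A's final fixup, as a function of the loop state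
def pvAfin (s : Int × Int × Int × Int) : Int :=
  if s.2.1 < s.2.2.1 then s.2.2.2 - s.2.2.1 else s.1

lemma pvRuns_cons_false (t : String) (r : List String) (i : Int) (hm : pvIsPet t = false) :
    pvRuns (t :: r) i = pvRuns r (i + 1) := by
  match r with
  | [] => simp [pvRuns, pvRunLen, hm]
  | u :: r' =>
    by_cases hu : pvIsPet u
    · simp [pvRuns, pvRunLen, hm, hu]
    · rw [pvRuns, pvRuns]
      simp only [pvRunLen, hm, hu, beq_iff_eq, Bool.false_eq_true, reduceIte,
        List.drop_succ_cons]
      congr 1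
      push_cast; ring

lemma pvRunLen_true_eq_takeWhile (l : List String) :
    pvRunLen true l = (l.takeWhile pvIsPet).length := by
  induction l with
  | nil => rfl
  | cons t r ih =>
    by_cases h : pvIsPet t
    · simp [pvRunLen, h, ih]
    · simp [pvRunLen, h]

lemma pvFoldl_pets (p : List String) (hp : ∀ x ∈ p, pvIsPet x = true)
    (res lm la idx : Int) :
    p.foldl pvAstep (res, lm, la, idx) = (res, lm, la + p.length, idx + p.length) := by
  induction p generalizing la idx with
  | nil => simp
  | cons x p ih =>
    have hx : pvIsPet x = true := hp x (by simp)
    simp only [List.foldl_cons, pvAstep]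
    rw [if_pos (by simpa [pvIsPet] using hx)]
    rw [ih (fun y hy => hp y (by simp [hy]))]
    simp only [List.length_cons]
    push_cast; ring_nf

lemma pvMain (n : Nat) : ∀ (l : List String), l.length ≤ n → ∀ (res lm idx : Int), 0 ≤ lm →
    pvAfin (l.foldl pvAstep (res, lm, 0, idx)) = ((pvRuns l idx).foldl pvPick (res, lm)).1 := by
  induction n with
  | zero =>
    intro l hl res lm idx hlm
    have : l = [] := List.length_eq_zero_iff.mp (Nat.le_zero.mp hl)
    subst this
    simp [pvRuns, pvAfin]
    omega
  | succ n ih =>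
    intro l hl res lm idx hlm
    match l with
    | [] => simp [pvRuns, pvAfin]; omega
    | t :: r =>
      cases hm : pvIsPet t with
      | false =>
        simp only [List.foldl_cons, pvAstep]
        rw [if_neg (by simp [pvIsPet] at hm ⊢; exact hm)]
        rw [if_neg (by omega)]
        rw [pvRuns_cons_false t r idx hm]
        exact ih r (by simp at hl; omega) res lm (idx + 1) hlm
      | true =>
        set p := r.takeWhile pvIsPet with hpdef
        set q := r.dropWhile pvIsPet with hqdef
        have hr : p ++ q = r := List.takeWhile_append_dropWhile
        have hp : ∀ x ∈ p, pvIsPet x = true := fun x hx => List.mem_takeWhile_imp hx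
        have hlen : pvRunLen true r = p.length := pvRunLen_true_eq_takeWhile r
        have hdrop : r.drop p.length = q := by
          rw [← hr]; exact List.drop_left (l₁ := p) (l₂ := q)
        have hruns : pvRuns (t :: r) idx =
            (idx, ((p.length : Int) + 1)) :: pvRuns q (idx + ((p.length : Int) + 1)) := by
          rw [pvRuns]
          simp only [hm, if_pos, hlen, hdrop]
          norm_num
        have hfold : (t :: r).foldl pvAstep (res, lm, 0, idx) =
            q.foldl pvAstep (res, lm, (p.length : Int) + 1, idx + ((p.length : Int) + 1)) := by
          simp only [List.foldl_cons, pvAstep]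
          rw [if_pos (by simp [pvIsPet] at hm ⊢; exact hm)]
          rw [← hr, List.foldl_append, pvFoldl_pets p hp]
          ring_nf
        rw [hfold, hruns]
        set k : Int := (p.length : Int) + 1 with hkdef
        have hk1 : 1 ≤ k := by omega
        match hq : q with
        | [] =>
          simp only [List.foldl_nil, List.foldl_cons, pvAfin, pvPick, pvRuns]
          split_ifs <;> simp_all
        | u :: q' =>
          have hu : pvIsPet u = false := by
            have h0 := List.dropWhile_get_zero_not (p := pvIsPet) r
              (by rw [← hqdef]; simp)
            simpa [← hqdef] using h0
          have hq' : q'.length ≤ n := by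
            have : (p ++ u :: q').length = r.length := by rw [hr]
            simp [List.length_append] at this
            simp at hl; omega
          simp only [List.foldl_cons]
          have hstep : pvAstep (res, lm, k, idx + k) u =
              (if lm < k then idx else res, if lm < k then k else lm, 0, idx + k + 1) := by
            simp only [pvAstep]
            rw [if_neg (by simp [pvIsPet] at hu ⊢; exact hu)]
            split_ifs <;> simp_all
          rw [hstep]
          have hlm' : 0 ≤ (if lm < k then k else lm) := by split_ifs <;> omega
          rw [ih q' hq' _ _ _ hlm']
          rw [pvRuns_cons_false u q' _ hu]
          have hpick : pvPick (res, lm) (idx, k) =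
              (if lm < k then idx else res, if lm < k then k else lm) := by
            simp only [pvPick]; split_ifs <;> simp_all
          rw [hpick]

-- ===== VERDICT (by name: the statement is the Claim_ definition above) =====
theorem subsecuencia_mas_larga_spec : Claim_equal_subsecuencia_mas_larga := by
  intro tipos _
  show subsecuencia_mas_larga tipos = subsecuencia_mas_larga_alt tipos
  exact pvMain tipos.length tipos le_rfl 0 0 0 le_rfl
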